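-- pv_equiv track=rewrite | github.com/christianledgard/proyecto2-DB2 | src/main.py | dic_palabras_con_terminos_mas_frecuentes
-- ===== SOURCE A (Python) =====
-- from operator import itemgetter
--
-- def dic_palabras_con_terminos_mas_frecuentes(lista):
--     """
--     calcular document frequency
--
--     :param lista: lista con terminos
--     """
--     frecuencia_palabras = dict()
--     for lista_archivo in lista:
--         for item in lista_archivo:
--             if item in frecuencia_palabras:
--                 frecuencia_palabras[item][0] += 1
--             else:
--                 frecuencia_palabras[item] = [1]
--
--     return dict(sorted(frecuencia_palabras.items(), key=itemgetter(1), reverse=True))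
-- ===== SOURCE B (Python) =====
-- def dic_palabras_con_terminos_mas_frecuentes(lista):
--     """
--     calcular document frequency (bucket/counting sort on the frequencies)
--
--     :param lista: lista con terminos
--     """
--     freq = {}
--     for lista_archivo in lista:
--         for item in lista_archivo:
--             freq[item] = freq.get(item, 0) + 1
--     if not freq:
--         return {}
--     max_c = max(freq.values())
--     buckets = [[] for _ in range(max_c + 1)]
--     for word, c in freq.items():
--         buckets[c].append(word)
--     result = {}
--     for c in range(max_c, 0, -1):
--         for word in buckets[c]:
--             result[word] = [c]
--     return result
-- ===== Notes on version B (the rewrite author's own statement) =====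
-- stated objective: alternative
-- what changed: Replaces A's comparison sort (stable reverse-sorted dict items keyed by the [count] list) with a counting/bucket sort: count into an int dict in one pass, append each word to a bucket indexed by its count, then emit buckets from the maximum count down to 1, which reproduces the stable tie order.
import Mathlib
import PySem

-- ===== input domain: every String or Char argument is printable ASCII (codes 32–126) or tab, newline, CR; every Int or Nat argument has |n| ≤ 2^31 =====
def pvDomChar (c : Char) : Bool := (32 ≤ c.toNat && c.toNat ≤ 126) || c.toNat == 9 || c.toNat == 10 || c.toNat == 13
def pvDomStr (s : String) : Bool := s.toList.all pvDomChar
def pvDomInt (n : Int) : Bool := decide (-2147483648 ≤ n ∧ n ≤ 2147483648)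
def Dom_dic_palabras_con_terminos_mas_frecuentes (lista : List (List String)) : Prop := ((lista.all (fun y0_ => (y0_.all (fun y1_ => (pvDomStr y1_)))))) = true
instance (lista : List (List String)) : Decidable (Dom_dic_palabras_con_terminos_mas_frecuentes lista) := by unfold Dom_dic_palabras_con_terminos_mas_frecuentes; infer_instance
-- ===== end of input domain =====

-- B replaces A's comparison sort of the frequency dict by a counting/bucket sort on the
-- frequencies (one pass to count, buckets indexed by count, emitted from max count down);
-- measurably faster is not claimed — the objective is the alternative algorithm.

-- ===== PORT A =====
-- dict(sorted(...)) over pairs with distinct keys keeps the sorted order, so it is the sorted list itself.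
def dic_palabras_con_terminos_mas_frecuentes (lista : List (List String)) : List (String × List Int) :=
  let frecuencia_palabras : PySem.Dict String (List Int) :=
    lista.foldl (fun d lista_archivo =>
      lista_archivo.foldl (fun d item =>
        if d.contains item then
          -- frecuencia_palabras[item][0] += 1  (in-place update of the one-element list)
          d.insert item (PySem.List.pySetD (d.getD item []) 0 (PySem.List.pyGetD (d.getD item []) 0 0 + 1))
        else d.insert item [1]) d) PySem.Dict.empty
  PySem.List.sorted frecuencia_palabras.items (fun p => p.2) true

-- ===== PORT B =====
def dic_palabras_con_terminos_mas_frecuentes_alt (lista : List (List String)) : List (String × List Int) :=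
  let freq : PySem.Dict String Int :=
    lista.foldl (fun d lista_archivo =>
      lista_archivo.foldl (fun d item => d.insert item (d.getD item 0 + 1)) d) PySem.Dict.empty
  -- `if not freq: return {}` + `max_c = max(freq.values())`: max? is none exactly on the empty dict
  match PySem.List.max? freq.values (fun v => v) with
  | none => []
  | some max_c =>
    let buckets : List (List String) :=
      freq.items.foldl (fun bs p =>
        PySem.List.pySetD bs p.2 (PySem.List.pyGetD bs p.2 [] ++ [p.1]))
        ((PySem.List.pyRange 0 (max_c + 1) 1).map (fun _ => []))
    (PySem.List.pyRange max_c 0 (-1)).foldl (fun res c =>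
      (PySem.List.pyGetD buckets c []).foldl (fun res word => res ++ [(word, [c])]) res) []

-- ===== PRECONDITION & SPEC =====
def Spec_dic_palabras_con_terminos_mas_frecuentes (lista : List (List String)) (out : List (String × List Int)) : Prop := out = dic_palabras_con_terminos_mas_frecuentes_alt lista
instance (lista : List (List String)) (out : List (String × List Int)) : Decidable (Spec_dic_palabras_con_terminos_mas_frecuentes lista out) := by unfold Spec_dic_palabras_con_terminos_mas_frecuentes; infer_instance

-- ===== CLAIM (what is proved, stated in full; the proofs are below) =====
def Claim_equal_dic_palabras_con_terminos_mas_frecuentes : Prop := ∀ (lista : List (List String)), Dom_dic_palabras_con_terminos_mas_frecuentes lista → Spec_dic_palabras_con_terminos_mas_frecuentes lista (dic_palabras_con_terminos_mas_frecuentes lista)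

-- ===== LEMMAS AND PROOFS =====

-- `[n] < [m]` on List Int (Python's list comparison of the singleton values) is `n < m`.
theorem pvSingleton_lt (a b : Int) : (([a] : List Int) < [b]) ↔ a < b := by
  rw [List.cons_lt_cons_iff]
  constructor
  · rintro (h | ⟨rfl, h⟩)
    · exact h
    · exact absurd h (by exact fun h => (List.lt_irrefl _ h))
  · exact Or.inl

-- the value-map relating B's counter to A's dict of one-element lists
def pvF (p : String × Int) : String × List Int := (p.1, [p.2])

def pvMapD (c : PySem.Dict String Int) : PySem.Dict String (List Int) := ⟨c.items.map pvF⟩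

theorem pvMapD_get? (c : PySem.Dict String Int) (w : String) :
    (pvMapD c).get? w = (c.get? w).map (fun n => [n]) := by
  simp only [pvMapD, PySem.Dict.get?, List.find?_map]
  have : ((fun p : String × List Int => p.1 == w) ∘ pvF) = (fun p : String × Int => p.1 == w) := by
    funext p; rfl
  rw [this]
  cases c.items.find? (fun p => p.1 == w) <;> rfl

theorem pvMapD_contains (c : PySem.Dict String Int) (w : String) :
    (pvMapD c).contains w = c.contains w := by
  simp only [pvMapD, PySem.Dict.contains, List.any_map]
  rfl

theorem pvMapD_insert (c : PySem.Dict String Int) (w : String) (v : Int) :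
    pvMapD (c.insert w v) = (pvMapD c).insert w [v] := by
  apply PySem.Dict.ext
  have h1 : (pvMapD (c.insert w v)).items = (c.insert w v).items.map pvF := rfl
  have h2 : (pvMapD c).items = c.items.map pvF := rfl
  rw [h1, PySem.Dict.items_insert, PySem.Dict.items_insert, pvMapD_contains, h2]
  by_cases hc : c.contains w
  · simp only [hc, if_true, List.map_map]
    apply List.map_congr_left
    intro p _
    by_cases hp : p.1 = w <;> simp [pvF, Function.comp, hp]
  · simp [hc, pvF]

-- one counting step commutes with pvMapD
theorem pvStep_rel (c : PySem.Dict String Int) (w : String) :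
    (if (pvMapD c).contains w then
       (pvMapD c).insert w (PySem.List.pySetD ((pvMapD c).getD w []) 0
         (PySem.List.pyGetD ((pvMapD c).getD w []) 0 0 + 1))
     else (pvMapD c).insert w [1])
    = pvMapD (c.insert w (c.getD w 0 + 1)) := by
  rw [pvMapD_insert, pvMapD_contains]
  by_cases hc : c.contains w
  · have hs : (c.get? w).isSome := by rw [← PySem.Dict.contains_eq_isSome_get?]; exact hc
    obtain ⟨n, hn⟩ := Option.isSome_iff_exists.mp hs
    have hD : (pvMapD c).getD w [] = [n] := by
      simp [PySem.Dict.getD, pvMapD_get?, hn]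
    have hd : c.getD w 0 = n := by simp [PySem.Dict.getD, hn]
    simp [hc, hD, hd, PySem.List.pyGetD_zero_cons, PySem.List.pySetD_of_nonneg]
  · have hg : c.get? w = none := by
      cases h : c.get? w with
      | none => rfl
      | some v => exact absurd (by rw [PySem.Dict.contains_eq_isSome_get?, h]; rfl) hc
    have hd : c.getD w 0 = 0 := by simp [PySem.Dict.getD, hg]
    simp [hc, hd]

theorem pvFold_rel (ws : List String) (c : PySem.Dict String Int) :
    ws.foldl (fun d item =>
        if d.contains item then
          d.insert item (PySem.List.pySetD (d.getD item []) 0 (PySem.List.pyGetD (d.getD item []) 0 0 + 1))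
        else d.insert item [1]) (pvMapD c)
    = pvMapD (ws.foldl (fun d item => d.insert item (d.getD item 0 + 1)) c) := by
  induction ws generalizing c with
  | nil => rfl
  | cons w ws ih => simpa [pvStep_rel c w] using ih (c.insert w (c.getD w 0 + 1))

-- insertBy walks past a block it does not go before
theorem pvInsertBy_skip {α : Type} (before : α → α → Bool) (x : α) (l rest : List α)
    (h : ∀ y ∈ l, before x y = false) :
    PySem.List.insertBy before x (l ++ rest) = l ++ PySem.List.insertBy before x rest := by
  induction l with
  | nil => rfl
  | cons y l ih =>
    simp only [List.cons_append, PySem.List.insertBy, h y (by simp), Bool.false_eq_true, if_false,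
      List.cons.injEq, true_and]
    exact ih (fun z hz => h z (by simp [hz]))

theorem pvInsertBy_front {α : Type} (before : α → α → Bool) (x : α) (rest : List α)
    (h : ∀ y ∈ rest, before x y = true) :
    PySem.List.insertBy before x rest = x :: rest := by
  cases rest with
  | nil => rfl
  | cons y l => simp [PySem.List.insertBy, h y (by simp)]

-- inserting into strictly-decreasing buckets appends to the element's own bucket
theorem pvInsertBy_buckets {α : Type} (k : α → Int) (x : α) (vs : List Int) (F : Int → List α)
    (hpure : ∀ v ∈ vs, ∀ y ∈ F v, k y = v)
    (hs : vs.Pairwise (fun a b => b < a))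
    (hmem : k x ∈ vs) :
    PySem.List.insertBy (fun a b => decide (k b < k a)) x (vs.flatMap F)
      = vs.flatMap (fun v => if v = k x then F v ++ [x] else F v) := by
  induction vs with
  | nil => exact absurd hmem (by simp)
  | cons v vs ih =>
    simp only [List.flatMap_cons]
    by_cases hv : v = k x
    · subst hv
      rw [pvInsertBy_skip _ _ _ _ (fun y hy => by
        have hk := hpure (k x) (by simp) y hy
        simp [hk])]
      rw [pvInsertBy_front _ _ _ (fun y hy => by
        obtain ⟨v', hv', hy'⟩ := List.mem_flatMap.mp hy
        have hk : k y = v' := hpure v' (by simp [hv']) y hy'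
        have hlt : v' < k x := (List.pairwise_cons.mp hs).1 v' hv'
        simp [hk, hlt])]
      have hrest : vs.flatMap (fun v' => if v' = k x then F v' ++ [x] else F v') = vs.flatMap F := by
        rw [List.flatMap_eq_foldl, List.flatMap_eq_foldl]
        apply PySem.List.foldl_congr_mem
        intro acc v' hv'
        have hlt : v' < k x := (List.pairwise_cons.mp hs).1 v' hv'
        simp [show v' ≠ k x from by omega]
      rw [hrest]
      simp
    · have hmem' : k x ∈ vs := by
        rcases List.mem_cons.mp hmem with h | h
        · exact absurd h.symm hv
        · exact h
      have hlt : k x < v := (List.pairwise_cons.mp hs).1 _ hmem'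
      rw [pvInsertBy_skip _ _ _ _ (fun y hy => by
        have hk := hpure v (by simp) y hy
        simp only [hk, decide_eq_false_iff_not]
        omega)]
      rw [ih (fun v' hv' y hy => hpure v' (by simp [hv']) y hy) (List.pairwise_cons.mp hs).2 hmem']
      simp [hv]

-- stable reverse sort with an Int key IS the bucket decomposition
theorem pvSorted_rev_buckets {α : Type} (xs : List α) (k : α → Int) (vs : List Int)
    (hs : vs.Pairwise (fun a b => b < a))
    (hall : ∀ x ∈ xs, k x ∈ vs) :
    PySem.List.sorted xs k true = vs.flatMap (fun v => xs.filter (fun x => k x == v)) := by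
  rw [PySem.List.sorted_rev_eq_foldl_insertBy]
  revert hall
  induction xs using List.reverseRecOn with
  | nil => simp
  | append_singleton xs x ih =>
    intro hall
    rw [List.foldl_append]
    simp only [List.foldl_cons, List.foldl_nil]
    rw [ih (fun y hy => hall y (by simp [hy]))]
    rw [pvInsertBy_buckets k x vs _ (fun v hv y hy => by
          have h1 := List.of_mem_filter hy
          exact of_decide_eq_true h1) hs (hall x (by simp))]
    have hstep : ∀ v : Int, (if v = k x then xs.filter (fun y => k y == v) ++ [x]
        else xs.filter (fun y => k y == v)) = (xs ++ [x]).filter (fun y => k y == v) := by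
      intro v
      rw [List.filter_append]
      by_cases hv : v = k x
      · subst hv; simp
      · simp [hv, show (k x == v) = false from beq_eq_false_iff_ne.mpr (fun h => hv h.symm)]
    simp only [hstep]

theorem pvInsertBy_congr {α : Type} (b1 b2 : α → α → Bool) (x : α) (l : List α)
    (h : ∀ y ∈ l, b1 x y = b2 x y) :
    PySem.List.insertBy b1 x l = PySem.List.insertBy b2 x l := by
  induction l with
  | nil => rfl
  | cons y l ih =>
    simp only [PySem.List.insertBy, h y (by simp)]
    split
    · rfl
    · simp only [List.cons.injEq, true_and]
      exact ih (fun z hz => h z (by simp [hz]))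

theorem pvFoldl_insertBy_congr {α : Type} (b1 b2 : α → α → Bool) (P : α → Prop)
    (hb : ∀ x y, P x → P y → b1 x y = b2 x y) :
    ∀ (xs acc : List α), (∀ x ∈ xs, P x) → (∀ y ∈ acc, P y) →
      xs.foldl (fun acc x => PySem.List.insertBy b1 x acc) acc
        = xs.foldl (fun acc x => PySem.List.insertBy b2 x acc) acc := by
  intro xs
  induction xs with
  | nil => intro acc _ _; rfl
  | cons w xs ih =>
    intro acc hxs hacc
    simp only [List.foldl_cons]
    have h1 : PySem.List.insertBy b1 w acc = PySem.List.insertBy b2 w acc :=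
      pvInsertBy_congr b1 b2 w acc (fun y hy => hb w y (hxs w (by simp)) (hacc y hy))
    rw [h1]
    apply ih
    · intro z hz; exact hxs z (by simp [hz])
    · intro y hy
      rcases (PySem.List.mem_insertBy b2 w y acc).mp hy with h | hy'
      · subst h; exact hxs _ (by simp)
      · exact hacc y hy'

-- sorting pairs whose values are one-element lists by the value list = sorting by the single entry
theorem pvSorted_key_singleton (xs : List (String × List Int))
    (h : ∀ p ∈ xs, ∃ n : Int, p.2 = [n]) :
    PySem.List.sorted xs (fun p => p.2) true
      = PySem.List.sorted xs (fun p => PySem.List.pyGetD p.2 0 0) true := by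
  rw [PySem.List.sorted_rev_eq_foldl_insertBy, PySem.List.sorted_rev_eq_foldl_insertBy]
  exact pvFoldl_insertBy_congr _ _ (fun p => ∃ n : Int, p.2 = [n])
    (fun p q hp hq => by
      obtain ⟨n, hn⟩ := hp
      obtain ⟨m, hm⟩ := hq
      simp [hn, hm, PySem.List.pyGetD_zero_cons, pvSingleton_lt])
    xs [] h (by simp)

-- bucket filling: length is preserved
theorem pvBK_len (l : List (String × Int)) (bs : List (List String)) :
    (l.foldl (fun bs p => PySem.List.pySetD bs p.2 (PySem.List.pyGetD bs p.2 [] ++ [p.1])) bs).length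
      = bs.length := by
  induction l generalizing bs with
  | nil => rfl
  | cons p l ih => simp [ih, PySem.List.length_pySetD]

-- bucket filling: bucket j collects, in order, the first components of the pairs with value j
theorem pvBK_get (l : List (String × Int)) (bs : List (List String))
    (hl : ∀ p ∈ l, 0 ≤ p.2 ∧ p.2 < (bs.length : Int)) (j : Nat) (hj : j < bs.length) :
    (l.foldl (fun bs p => PySem.List.pySetD bs p.2 (PySem.List.pyGetD bs p.2 [] ++ [p.1])) bs).getD j []
      = bs.getD j [] ++ (l.filter (fun p => p.2 == (j : Int))).map (fun p => p.1) := by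
  induction l generalizing bs with
  | nil => simp
  | cons p l ih =>
    obtain ⟨h0, hlt⟩ := hl p (List.mem_cons_self)
    have htl : p.2.toNat < bs.length := by omega
    rw [List.foldl_cons, PySem.List.pySetD_of_nonneg _ _ h0]
    rw [ih (bs.set p.2.toNat (PySem.List.pyGetD bs p.2 [] ++ [p.1]))
        (fun q hq => by simpa [List.length_set] using hl q (by simp [hq]))
        (by simpa [List.length_set] using hj)]
    rw [PySem.List.pyGetD_eq_getElem bs [] h0 hlt]
    by_cases hjt : p.2.toNat = j
    · have hpj : (p.2 == (j : Int)) = true := by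
        simp only [beq_iff_eq]; omega
      rw [List.getD_eq_getElem?_getD, List.getElem?_set]
      simp only [hjt, if_pos hj]
      rw [List.filter_cons, hpj]
      simp [List.getD_eq_getElem?_getD, List.getElem?_eq_getElem hj]
    · have hpj : (p.2 == (j : Int)) = false := by
        simp only [beq_eq_false_iff_ne]; omega
      rw [List.getD_eq_getElem?_getD, List.getElem?_set]
      simp only [hjt, if_false, List.filter_cons, hpj]
      rw [← List.getD_eq_getElem?_getD]
      simp

-- ===== VERDICT (by name: the statement is the Claim_ definition above) =====
theorem dic_palabras_con_terminos_mas_frecuentes_spec : Claim_equal_dic_palabras_con_terminos_mas_frecuentes := by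
  intro lista _
  unfold Spec_dic_palabras_con_terminos_mas_frecuentes
  unfold dic_palabras_con_terminos_mas_frecuentes dic_palabras_con_terminos_mas_frecuentes_alt
  -- both counting loops are the same loop over the flattened word list
  rw [← List.foldl_flatten, ← List.foldl_flatten]
  rw [show (PySem.Dict.empty : PySem.Dict String (List Int)) = pvMapD PySem.Dict.empty from rfl,
      pvFold_rel, PySem.Dict.foldl_insert_getD_add_one_eq_counter]
  dsimp only
  set ws := lista.flatten with hws
  set m := (PySem.Dict.counter ws).items with hm
  have hval : (PySem.Dict.counter ws).values = m.map (fun p => p.2) := rfl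
  have hitems : (pvMapD (PySem.Dict.counter ws)).items = m.map pvF := rfl
  have hpos : ∀ p ∈ m, 1 ≤ p.2 := by
    intro p hp
    rw [hm, PySem.Dict.items_counter] at hp
    obtain ⟨k, hk, rfl⟩ := List.mem_map.mp hp
    have : k ∈ ws := (PySem.Set.mem_ofList ws k).mp hk
    have := List.count_pos_iff.mpr this
    simp only []
    omega
  cases hmax : PySem.List.max? (PySem.Dict.counter ws).values (fun v => v) with
  | none =>
    have : m.map (fun p => p.2) = [] := by rw [← hval]; exact (PySem.List.max?_eq_none_iff _ _).mp hmax
    have hmnil : m = [] := by simpa using this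
    rw [hitems, hmnil]
    rfl
  | some max_c =>
    simp only [hitems]
    have hub : ∀ p ∈ m, p.2 ≤ max_c := by
      intro p hp
      exact PySem.List.max?_isMax hmax p.2 (by rw [hval]; exact List.mem_map_of_mem hp)
    have hmc1 : 1 ≤ max_c := by
      have hmem := PySem.List.max?_mem hmax
      rw [hval] at hmem
      obtain ⟨p, hp, hpe⟩ := List.mem_map.mp hmem
      have := hpos p hp
      omega
    set vs := PySem.List.pyRange max_c 0 (-1) with hvs
    have hsdec : vs.Pairwise (fun a b => b < a) := by
      rw [hvs, PySem.List.pyRange_neg_one_eq_reverse]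
      exact List.pairwise_reverse.mpr (PySem.List.pairwise_lt_pyRange_one _ _)
    -- A side: stable reverse sort = buckets of equal counts, largest first
    have hsing : ∀ q ∈ m.map pvF, ∃ n : Int, q.2 = [n] := by
      intro q hq
      obtain ⟨p, _, rfl⟩ := List.mem_map.mp hq
      exact ⟨p.2, rfl⟩
    rw [pvSorted_key_singleton _ hsing]
    rw [pvSorted_rev_buckets (m.map pvF) (fun q => PySem.List.pyGetD q.2 0 0) vs hsdec
        (by
          intro q hq
          obtain ⟨p, hp, rfl⟩ := List.mem_map.mp hq
          have h1 : PySem.List.pyGetD (pvF p).2 0 0 = p.2 := PySem.List.pyGetD_zero_cons _ _ _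
          dsimp only
          rw [h1, hvs, PySem.List.mem_pyRange_neg_one]
          exact ⟨by have := hpos p hp; omega, hub p hp⟩)]
    -- B side: bucket lookup
    set base : List (List String) := (PySem.List.pyRange 0 (max_c + 1) 1).map (fun _ => []) with hbase
    have hlenbase : base.length = (max_c + 1).toNat := by
      rw [hbase, List.length_map, PySem.List.length_pyRange_one]
      simp
    have hlenbase' : (base.length : Int) = max_c + 1 := by
      rw [hlenbase, Int.toNat_of_nonneg (by omega)]
    set buckets : List (List String) :=
      m.foldl (fun bs p => PySem.List.pySetD bs p.2 (PySem.List.pyGetD bs p.2 [] ++ [p.1])) base with hbuckets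
    have hbkl : buckets.length = base.length := pvBK_len m base
    have hbucket : ∀ v ∈ vs, PySem.List.pyGetD buckets v []
        = (m.filter (fun p => p.2 == v)).map (fun p => p.1) := by
      intro v hv
      rw [hvs, PySem.List.mem_pyRange_neg_one] at hv
      have hv0 : 0 ≤ v := by omega
      have hvlen : v < (buckets.length : Int) := by rw [hbkl, hlenbase']; omega
      rw [PySem.List.pyGetD_eq_getElem _ _ hv0 hvlen]
      have hjlt : v.toNat < base.length := by omega
      have hget := pvBK_get m base
        (fun p hp => ⟨by have := hpos p hp; omega, by rw [hlenbase']; have := hub p hp; omega⟩)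
        v.toNat hjlt
      rw [← hbuckets] at hget
      rw [← List.getD_eq_getElem buckets [] (by omega), hget]
      have hbase0 : base.getD v.toNat [] = [] := by
        rw [hbase, List.getD_eq_getElem?_getD, List.getElem?_map]
        cases (PySem.List.pyRange 0 (max_c + 1) 1)[v.toNat]? <;> rfl
      rw [hbase0, List.nil_append]
      have : ((v.toNat : Int)) = v := Int.toNat_of_nonneg hv0
      rw [this]
    -- B's emit loop is the flatMap over the countdown range
    simp only [PySem.List.foldl_append_singleton_eq_map]
    rw [PySem.List.foldl_append_eq_flatMap
      (fun c => (PySem.List.pyGetD buckets c []).map (fun word => (word, [c]))), List.nil_append]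
    -- match the two flatMaps bucket by bucket
    apply List.flatMap_congr
    intro v hv
    rw [hbucket v hv, List.filter_map, List.map_map]
    have hcomp : ((fun q : String × List Int => PySem.List.pyGetD q.2 0 0 == v) ∘ pvF)
        = (fun p : String × Int => p.2 == v) := by
      funext p
      simp [pvF, PySem.List.pyGetD_zero_cons]
    rw [hcomp]
    apply List.map_congr_left
    intro p hp
    have : p.2 = v := by simpa using (List.mem_filter.mp hp).2
    simp [pvF, this]
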